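-- pv_equiv track=rewrite | github.com/TimurTsedik/simple_ai_agent_bot | app/tools/digestTopicSeeds.py | collectSeedKeywordsForTopics
-- ===== SOURCE A (Python) =====
-- from typing import Final
--
-- _DIGEST_TOPIC_SEED_KEYWORDS: Final[dict[str, list[str]]] = {
--     "ai": [
--         "llm",
--         "gpt",
--         "claude",
--         "openai",
--         "neural",
--         "инференс",
--         "модель",
--         "агент",
--         "генератив",
--         "embedding",
--         "трансформер",
--         "fine-tun",
--         "rag",
--         "машинное обучение",
--     ],
--     "economy": [
--         "инфляц",
--         "цб",
--         "фрс",
--         "fed",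
--         "gdp",
--         "ввп",
--         "ставк",
--         "офз",
--         "минфин",
--         "бюджет",
--         "дефицит",
--         "pmi",
--         "рынок облигаций",
--     ],
--     "crypto": [
--         "bitcoin",
--         "btc",
--         "ethereum",
--         "eth",
--         "крипт",
--         "defi",
--         "stablecoin",
--         "блокчейн",
--         "etf на биткоин",
--     ],
--     "markets": [
--         "индекс",
--         "s&p",
--         "nasdaq",
--         "moex",
--         "imoex",
--         "фьючерс",
--         "опцион",
--         "волатильность",
--         "ликвидность",
--     ],
--     "tech": [
--         "chip",
--         "semiconductor",
--         "nvidia",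
--         "datacenter",
--         "cloud",
--         "saas",
--         "кибер",
--         "security",
--     ],
--     "custom": [],
-- }
--
-- def collectSeedKeywordsForTopics(in_topics: list[str]) -> list[str]:
--     ret: list[str]
--     merged: list[str] = []
--     seen: set[str] = set()
--     for rawTopic in in_topics:
--         if not isinstance(rawTopic, str):
--             continue
--         topicKey = rawTopic.strip().lower()
--         if not topicKey:
--             continue
--         seedList = _DIGEST_TOPIC_SEED_KEYWORDS.get(topicKey, [])
--         for seed in seedList:
--             normalized = seed.strip()
--             if not normalized:
--                 continue
--             keyLower = normalized.lower()
--             if keyLower in seen: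
--                 continue
--             seen.add(keyLower)
--             merged.append(normalized)
--     ret = merged
--     return ret
-- ===== SOURCE B (Python) =====
-- from typing import Final
--
-- _DIGEST_TOPIC_SEED_KEYWORDS: Final[dict[str, list[str]]] = {
--     "ai": [
--         "llm", "gpt", "claude", "openai", "neural", "инференс", "модель",
--         "агент", "генератив", "embedding", "трансформер", "fine-tun", "rag",
--         "машинное обучение",
--     ],
--     "economy": [
--         "инфляц", "цб", "фрс", "fed", "gdp", "ввп", "ставк", "офз", "минфин",
--         "бюджет", "дефицит", "pmi", "рынок облигаций",
--     ],
--     "crypto": [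
--         "bitcoin", "btc", "ethereum", "eth", "крипт", "defi", "stablecoin",
--         "блокчейн", "etf на биткоин",
--     ],
--     "markets": [
--         "индекс", "s&p", "nasdaq", "moex", "imoex", "фьючерс", "опцион",
--         "волатильность", "ликвидность",
--     ],
--     "tech": [
--         "chip", "semiconductor", "nvidia", "datacenter", "cloud", "saas",
--         "кибер", "security",
--     ],
--     "custom": [],
-- }
--
--
-- def collectSeedKeywordsForTopics(in_topics: list[str]) -> list[str]:
--     # flatten the stripped, non-empty seeds of every valid topic (no dedup)
--     candidates = [
--         stripped
--         for rawTopic in in_topics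
--         if isinstance(rawTopic, str) and (topicKey := rawTopic.strip().lower())
--         for seed in _DIGEST_TOPIC_SEED_KEYWORDS.get(topicKey, [])
--         if (stripped := seed.strip())
--     ]
--     # dedup without any seen-set: repeatedly take the head and FILTER every
--     # later case-insensitive duplicate of it out of the remaining list
--     ret: list[str] = []
--     while candidates:
--         head = candidates[0]
--         key = head.lower()
--         ret.append(head)
--         candidates = [c for c in candidates[1:] if c.lower() != key]
--     return ret
-- ===== Notes on version B (the rewrite author's own statement) =====
-- stated objective: alternative
-- what changed: Instead of A's single fused loop that dedups on the fly with a lowercase seen-set, B first flattens all stripped non-empty seeds of the valid topics into one candidate list and then dedups it with no set at all, by repeatedly taking the head and filtering every later case-insensitive duplicate out of the remainder (Haskell-nub style).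
import Mathlib
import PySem

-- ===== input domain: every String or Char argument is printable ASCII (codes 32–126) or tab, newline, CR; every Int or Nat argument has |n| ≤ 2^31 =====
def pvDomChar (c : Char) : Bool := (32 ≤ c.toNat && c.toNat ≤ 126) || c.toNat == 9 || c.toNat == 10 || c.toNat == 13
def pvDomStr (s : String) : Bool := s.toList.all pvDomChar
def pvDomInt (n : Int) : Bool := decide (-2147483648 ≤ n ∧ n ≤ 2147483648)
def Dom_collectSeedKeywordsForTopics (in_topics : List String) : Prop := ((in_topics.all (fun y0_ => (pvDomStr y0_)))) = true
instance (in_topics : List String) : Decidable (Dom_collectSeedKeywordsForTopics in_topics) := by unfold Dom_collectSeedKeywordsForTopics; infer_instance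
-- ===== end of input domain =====

-- B replaces A's fused seen-set dedup loop by flatten-then-nub: build the full
-- candidate list first, then dedup it with no seen-set at all by repeatedly
-- taking the head and filtering out its later case-insensitive duplicates
-- (objective: alternative).


-- shared module constant: _DIGEST_TOPIC_SEED_KEYWORDS.get(k, []) as a lookup function
def pvSeedsFor (k : String) : List String :=
  if k = "ai" then
    ["llm", "gpt", "claude", "openai", "neural", "инференс", "модель",
     "агент", "генератив", "embedding", "трансформер", "fine-tun", "rag",
     "машинное обучение"]
  else if k = "economy" then
    ["инфляц", "цб", "фрс", "fed", "gdp", "ввп", "ставк", "офз", "минфин",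
     "бюджет", "дефицит", "pmi", "рынок облигаций"]
  else if k = "crypto" then
    ["bitcoin", "btc", "ethereum", "eth", "крипт", "defi", "stablecoin",
     "блокчейн", "etf на биткоин"]
  else if k = "markets" then
    ["индекс", "s&p", "nasdaq", "moex", "imoex", "фьючерс", "опцион",
     "волатильность", "ликвидность"]
  else if k = "tech" then
    ["chip", "semiconductor", "nvidia", "datacenter", "cloud", "saas",
     "кибер", "security"]
  else if k = "custom" then []
  else []

-- ===== PORT A =====
-- A's dedup step on one already-stripped seed: skip if its lowercase key was
-- seen, else record the key in the set and append the seed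
def pvDedupStep (st : List String × PySem.Set String) (cand : String) :
    List String × PySem.Set String :=
  if PySem.Set.contains st.2 (PySem.Str.lower cand) then st
  else (st.1 ++ [cand], PySem.Set.add st.2 (PySem.Str.lower cand))

def collectSeedKeywordsForTopics (in_topics : List String) : List String :=
  (in_topics.foldl
    (fun st rawTopic =>
      if PySem.Str.lower (PySem.Str.strip rawTopic) = "" then st
      else
        (pvSeedsFor (PySem.Str.lower (PySem.Str.strip rawTopic))).foldl
          (fun st2 seed =>
            if PySem.Str.strip seed = "" then st2
            else pvDedupStep st2 (PySem.Str.strip seed))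
          st)
    ([], PySem.Set.empty)).1

-- ===== PORT B =====
-- B's while loop: take the head, filter its later lowercase duplicates out of
-- the remainder, recurse (terminates because filter never lengthens the list)
def pvNub : List String → List String
  | [] => []
  | h :: t =>
      h :: pvNub (t.filter (fun c => PySem.Str.lower c != PySem.Str.lower h))
termination_by l => l.length
decreasing_by
  simpa using Nat.lt_succ_of_le (List.length_filter_le _ _)

def collectSeedKeywordsForTopics_alt (in_topics : List String) : List String :=
  -- pass 1: flatten stripped non-empty seeds of every valid topic (no dedup)
  -- pass 2: head-and-filter dedup (pvNub), no seen set
  pvNub (in_topics.flatMap (fun rawTopic =>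
    if PySem.Str.lower (PySem.Str.strip rawTopic) = "" then []
    else (pvSeedsFor (PySem.Str.lower (PySem.Str.strip rawTopic))).filterMap
      (fun seed =>
        if PySem.Str.strip seed = "" then none
        else some (PySem.Str.strip seed))))

-- ===== PRECONDITION & SPEC =====
def Spec_collectSeedKeywordsForTopics (in_topics : List String) (out : List String) : Prop := out = collectSeedKeywordsForTopics_alt in_topics
instance (in_topics : List String) (out : List String) : Decidable (Spec_collectSeedKeywordsForTopics in_topics out) := by unfold Spec_collectSeedKeywordsForTopics; infer_instance

-- ===== CLAIM =====
def Claim_equal_collectSeedKeywordsForTopics : Prop := ∀ (in_topics : List String), Dom_collectSeedKeywordsForTopics in_topics → Spec_collectSeedKeywordsForTopics in_topics (collectSeedKeywordsForTopics in_topics)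

-- ===== LEMMAS AND PROOFS =====

-- B's per-topic candidate list, parametric in the seed table so the proofs
-- never unfold the large literal table
def pvCandsG (g : String → List String) (rawTopic : String) : List String :=
  if PySem.Str.lower (PySem.Str.strip rawTopic) = "" then []
  else (g (PySem.Str.lower (PySem.Str.strip rawTopic))).filterMap
    (fun seed =>
      if PySem.Str.strip seed = "" then none
      else some (PySem.Str.strip seed))

-- A's inner loop over raw seeds = the dedup fold over the stripped, filtered seeds
theorem pv_inner_eq (seeds : List String) (st : List String × PySem.Set String) :
    seeds.foldl
      (fun st2 seed =>
        if PySem.Str.strip seed = "" then st2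
        else pvDedupStep st2 (PySem.Str.strip seed)) st
    = (seeds.filterMap
        (fun seed =>
          if PySem.Str.strip seed = "" then none
          else some (PySem.Str.strip seed))).foldl pvDedupStep st := by
  induction seeds generalizing st with
  | nil => simp only [List.foldl_nil, List.filterMap_nil]
  | cons s rest ih =>
      simp only [List.foldl_cons, List.filterMap_cons]
      by_cases h : PySem.Str.strip s = "" <;> simp [h, ih]

-- A's per-topic step = the dedup fold over that topic's candidate list
theorem pv_topic_eq (g : String → List String) (t : String)
    (st : List String × PySem.Set String) :
    (if PySem.Str.lower (PySem.Str.strip t) = "" then st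
     else
       (g (PySem.Str.lower (PySem.Str.strip t))).foldl
         (fun st2 seed =>
           if PySem.Str.strip seed = "" then st2
           else pvDedupStep st2 (PySem.Str.strip seed))
         st)
    = (pvCandsG g t).foldl pvDedupStep st := by
  unfold pvCandsG
  by_cases h : PySem.Str.lower (PySem.Str.strip t) = ""
  · rw [if_pos h]; rw [if_pos h, List.foldl_nil]
  · rw [if_neg h]; rw [if_neg h, pv_inner_eq]

-- A's fused outer fold = the dedup fold over the flattened candidate list
theorem pv_outer_eq (g : String → List String) (ts : List String)
    (st : List String × PySem.Set String) :
    ts.foldl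
      (fun st rawTopic =>
        if PySem.Str.lower (PySem.Str.strip rawTopic) = "" then st
        else
          (g (PySem.Str.lower (PySem.Str.strip rawTopic))).foldl
            (fun st2 seed =>
              if PySem.Str.strip seed = "" then st2
              else pvDedupStep st2 (PySem.Str.strip seed))
            st) st
    = (ts.flatMap (pvCandsG g)).foldl pvDedupStep st := by
  induction ts generalizing st with
  | nil => simp only [List.foldl_nil, List.flatMap_nil]
  | cons t rest ih =>
      simp only [List.foldl_cons]
      rw [pv_topic_eq, ih, List.flatMap_cons, List.foldl_append]

-- membership in an extended set, as a boolean identity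
theorem pv_contains_add (s : PySem.Set String) (y w : String) :
    PySem.Set.contains (PySem.Set.add s y) w = (PySem.Set.contains s w || (w == y)) := by
  rw [PySem.Set.add_eq_ite]
  by_cases hy : y ∈ s
  · rw [if_pos hy]
    cases heq : (w == y)
    · simp
    · have hw : w = y := by simpa using heq
      subst hw
      simp [hy]
  · rw [if_neg hy]
    by_cases hwy : w = y <;> simp [hwy]

-- unfolding equation for pvNub on a cons
theorem pvNub_cons (h : String) (t : List String) :
    pvNub (h :: t) = h :: pvNub (t.filter (fun c => PySem.Str.lower c != PySem.Str.lower h)) := by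
  rw [pvNub]

-- core invariant: the seen-set dedup fold from state (out, s) emits out followed
-- by the head-and-filter nub of the candidates whose lowercase key is not in s
theorem pv_fold_eq_nub (l : List String) (out : List String) (s : PySem.Set String) :
    (l.foldl pvDedupStep (out, s)).1
    = out ++ pvNub (l.filter (fun c => !(PySem.Set.contains s (PySem.Str.lower c)))) := by
  induction l generalizing out s with
  | nil => simp [pvNub]
  | cons c t ih =>
      simp only [List.foldl_cons, List.filter_cons]
      by_cases h : PySem.Set.contains s (PySem.Str.lower c) = true
      · rw [pvDedupStep, if_pos h]
        rw [if_neg (by simpa using h)]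
        exact ih out s
      · rw [pvDedupStep, if_neg h, if_pos (by simpa using h :
          (!PySem.Set.contains s (PySem.Str.lower c)) = true)]
        rw [ih, pvNub_cons, List.filter_filter, List.append_cons]
        have hpred : ∀ x ∈ t,
            (!(PySem.Set.contains (PySem.Set.add s (PySem.Str.lower c)) (PySem.Str.lower x)))
            = ((PySem.Str.lower x != PySem.Str.lower c)
                && !(PySem.Set.contains s (PySem.Str.lower x))) := by
          intro x _
          rw [pv_contains_add]
          cases hcx : PySem.Set.contains s (PySem.Str.lower x) <;>
            cases heq : (PySem.Str.lower x == PySem.Str.lower c) <;> simp_all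
        rw [List.filter_congr hpred]; simp

-- ===== VERDICT =====
theorem collectSeedKeywordsForTopics_spec : Claim_equal_collectSeedKeywordsForTopics := by
  intro ts _
  show collectSeedKeywordsForTopics ts = collectSeedKeywordsForTopics_alt ts
  unfold collectSeedKeywordsForTopics collectSeedKeywordsForTopics_alt
  rw [pv_outer_eq pvSeedsFor, pv_fold_eq_nub, List.nil_append]
  have hf : (ts.flatMap (pvCandsG pvSeedsFor)).filter
      (fun c => !(PySem.Set.contains PySem.Set.empty (PySem.Str.lower c)))
      = ts.flatMap (pvCandsG pvSeedsFor) := by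
    simp [PySem.Set.empty]
  rw [hf]
  rfl
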